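-- pv_equiv track=rewrite | github.com/JeffC7/CSE337-Scripting-Languages | a01_ChinJeffrey/cseise337_a01.py | is_chaotic
-- ===== SOURCE A (Python) =====
-- def is_chaotic(s):
--     map = {}
--     hashSet = set()
--     for c in s:
--         map.update({c : map.get(c, 0)+1})
--
--     for num in map.values():
--         if num not in hashSet:
--             hashSet.add(num)
--         else:
--             return "ELMA"
--     return "TOHRU"
-- ===== SOURCE B (Python) =====
-- def is_chaotic(s):
--     counts = {}
--     for c in s:
--         counts[c] = counts.get(c, 0) + 1
--     vals = sorted(counts.values())
--     for x, y in zip(vals, vals[1:]):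
--         if x == y:
--             return "ELMA"
--     return "TOHRU"
-- ===== Notes on version B (the rewrite author's own statement) =====
-- stated objective: alternative
-- what changed: Replaces the hash-set membership loop over the count values with a sort of the values followed by a single adjacent-pair scan that reports the first equal neighbours.
import Mathlib
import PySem

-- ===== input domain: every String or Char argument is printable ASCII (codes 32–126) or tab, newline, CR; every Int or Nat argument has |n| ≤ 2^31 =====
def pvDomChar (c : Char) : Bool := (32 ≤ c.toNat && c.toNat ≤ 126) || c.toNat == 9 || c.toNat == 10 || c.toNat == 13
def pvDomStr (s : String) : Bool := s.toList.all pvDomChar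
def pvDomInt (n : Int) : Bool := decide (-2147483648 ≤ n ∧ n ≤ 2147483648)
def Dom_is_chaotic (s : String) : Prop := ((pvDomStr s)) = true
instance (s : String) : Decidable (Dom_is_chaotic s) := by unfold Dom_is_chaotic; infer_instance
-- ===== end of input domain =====

-- B replaces A's hash-set membership loop over the count values by sorting the values
-- and scanning once for an equal adjacent pair (objective: alternative algorithm).

-- shared counting loop: both Pythons build the char→count dict with the literal same loop
-- (A: map.update({c : map.get(c, 0)+1});  B: counts[c] = counts.get(c, 0) + 1)
def pvCount (cs : List Char) : PySem.Dict Char Int :=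
  cs.foldl (fun m c => m.insert c (m.getD c 0 + 1)) PySem.Dict.empty

-- ===== PORT A =====

-- for num in map.values(): if num not in hashSet: hashSet.add(num) else: return "ELMA"
def pvLoopA : List Int → PySem.Set Int → String
  | [], _ => "TOHRU"
  | n :: rest, hs => if n ∉ hs then pvLoopA rest (hs.add n) else "ELMA"

def is_chaotic (s : String) : String :=
  pvLoopA (PySem.Dict.values (pvCount s.toList)) PySem.Set.empty

-- ===== PORT B =====
-- for x, y in zip(vals, vals[1:]): if x == y: return "ELMA"
def pvScanAdj : List Int → String
  | x :: y :: rest => if x = y then "ELMA" else pvScanAdj (y :: rest)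
  | _ => "TOHRU"

def is_chaotic_alt (s : String) : String :=
  pvScanAdj (PySem.List.sorted (PySem.Dict.values (pvCount s.toList)) (fun x => x) false)

-- ===== PRECONDITION & SPEC =====
def Spec_is_chaotic (s : String) (out : String) : Prop := out = is_chaotic_alt s
instance (s : String) (out : String) : Decidable (Spec_is_chaotic s out) := by unfold Spec_is_chaotic; infer_instance

-- ===== CLAIM (what is proved, stated in full; the proofs are below) =====
def Claim_equal_is_chaotic : Prop := ∀ (s : String), Dom_is_chaotic s → Spec_is_chaotic s (is_chaotic s)

-- ===== LEMMAS AND PROOFS =====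

-- A's loop returns "TOHRU" iff the remaining values are distinct and avoid the set so far
theorem pvLoopA_eq (ns : List Int) (hs : PySem.Set Int) :
    pvLoopA ns hs = if ns.Nodup ∧ ∀ n ∈ ns, n ∉ hs then "TOHRU" else "ELMA" := by
  induction ns generalizing hs with
  | nil => simp [pvLoopA]
  | cons n rest ih =>
    by_cases hmem : n ∈ hs
    · rw [pvLoopA, if_neg (not_not_intro hmem), if_neg]
      rintro ⟨_, hall⟩
      exact hall n (List.mem_cons_self) hmem
    · rw [pvLoopA, if_pos hmem, ih]
      refine if_congr (Iff.symm ?_) rfl rfl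
      constructor
      · rintro ⟨hnd, hall⟩
        have hnr : n ∉ rest := (List.nodup_cons.mp hnd).1
        refine ⟨(List.nodup_cons.mp hnd).2, fun m hm hin => ?_⟩
        rcases (PySem.Set.mem_add _ _ _).mp hin with h1 | h2
        · exact hall m (List.mem_cons_of_mem _ hm) h1
        · exact hnr (h2 ▸ hm)
      · rintro ⟨hnd, hall⟩
        have hnr : n ∉ rest := fun hr => hall n hr ((PySem.Set.mem_add _ _ _).mpr (Or.inr rfl))
        refine ⟨List.nodup_cons.mpr ⟨hnr, hnd⟩, fun m hm => ?_⟩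
        rcases List.mem_cons.mp hm with rfl | hm'
        · exact hmem
        · exact fun hin => hall m hm' ((PySem.Set.mem_add _ _ _).mpr (Or.inl hin))

-- B's adjacent scan on a ≤-sorted list returns "TOHRU" iff the list is duplicate-free
theorem pvScanAdj_eq (ns : List Int) (hsort : ns.Pairwise (· ≤ ·)) :
    pvScanAdj ns = if ns.Nodup then "TOHRU" else "ELMA" := by
  induction ns with
  | nil => simp [pvScanAdj]
  | cons x rest ih =>
    cases rest with
    | nil => simp [pvScanAdj]
    | cons y t =>
      rcases List.pairwise_cons.mp hsort with ⟨hx, htail⟩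
      by_cases hxy : x = y
      · subst hxy
        rw [pvScanAdj, if_pos rfl, if_neg]
        intro hnd
        exact (List.nodup_cons.mp hnd).1 (List.mem_cons_self)
      · rw [pvScanAdj, if_neg hxy, ih htail]
        refine if_congr ?_ rfl rfl
        constructor
        · intro h
          refine List.nodup_cons.mpr ⟨?_, h⟩
          intro hx_mem
          rcases List.mem_cons.mp hx_mem with rfl | hxt
          · exact hxy rfl
          · have hyx : y ≤ x := (List.pairwise_cons.mp htail).1 x hxt
            exact hxy (le_antisymm (hx y (List.mem_cons_self)) hyx)
        · exact fun h => (List.nodup_cons.mp h).2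

theorem pvCombine (vs : List Int) :
    pvLoopA vs PySem.Set.empty = pvScanAdj (PySem.List.sorted vs (fun x => x) false) := by
  rw [pvLoopA_eq, pvScanAdj_eq _ (by simpa using PySem.List.sorted_pairwise vs (fun x => x))]
  have hnodup : (PySem.List.sorted vs (fun x => x) false).Nodup ↔ vs.Nodup :=
    (PySem.List.sorted_perm vs (fun x => x) false).nodup_iff
  refine if_congr ?_ rfl rfl
  constructor
  · rintro ⟨h, _⟩; exact hnodup.mpr h
  · intro h
    exact ⟨hnodup.mp h, fun n _ hin => by simp [PySem.Set.empty] at hin⟩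

theorem is_chaotic_eq_alt (s : String) : is_chaotic s = is_chaotic_alt s := by
  unfold is_chaotic is_chaotic_alt
  exact pvCombine _

-- ===== VERDICT (by name: the statement is the Claim_ definition above) =====
theorem is_chaotic_spec : Claim_equal_is_chaotic := by
  intro s _
  exact is_chaotic_eq_alt s
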